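-- pv_equiv track=rewrite | github.com/jenfly/atmos-read | scripts/merra-wget-url-list-msebudget.py | prodnum
-- ===== SOURCE A (Python) =====
-- def prodnum(year):
--     prod_dict = {yr: '100' for yr in range(1980, 1992)}
--     for yr in range(1992, 2001):
--         prod_dict[yr] = '200'
--     for yr in range(2001, 2011):
--         prod_dict[yr] = '300'
--     for yr in range(2011, 2017):
--         prod_dict[yr] = '400'
--     prod = prod_dict[year]
--     return prod
-- ===== SOURCE B (Python) =====
-- def prodnum(year):
--     if not 1980 <= year < 2017:
--         raise KeyError(year)
--     if year < 1992:
--         return '100'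
--     elif year < 2001:
--         return '200'
--     elif year < 2011:
--         return '300'
--     else:
--         return '400'
-- ===== Notes on version B (the rewrite author's own statement) =====
-- stated objective: simpler
-- what changed: Replaces building a 37-entry dict (a comprehension plus three fill loops) and a lookup with direct range dispatch on the year via an if/elif chain; both raise KeyError outside 1980-2016, which Pre_ excludes.
import Mathlib
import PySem

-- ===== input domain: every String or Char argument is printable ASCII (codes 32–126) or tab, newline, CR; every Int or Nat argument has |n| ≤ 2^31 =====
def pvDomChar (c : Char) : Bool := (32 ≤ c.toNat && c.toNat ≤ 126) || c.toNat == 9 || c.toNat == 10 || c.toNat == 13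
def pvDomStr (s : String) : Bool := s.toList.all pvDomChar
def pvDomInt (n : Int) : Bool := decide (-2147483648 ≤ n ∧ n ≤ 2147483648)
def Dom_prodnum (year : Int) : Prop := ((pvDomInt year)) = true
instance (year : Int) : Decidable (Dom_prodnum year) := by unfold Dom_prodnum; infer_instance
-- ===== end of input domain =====

set_option maxRecDepth 10000


-- B replaces A's 37-entry dict (comprehension plus three fill loops) with direct range dispatch: simpler.

-- ===== PORT A =====
-- dict comprehension over range(1980,1992), then three fill loops, then a lookup;
-- the lookup's none case is Python's KeyError, excluded by Pre_prodnum.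
def prodnum (year : Int) : String :=
  let d : PySem.Dict Int String :=
    (PySem.List.pyRange 1980 1992 1).foldl (fun d yr => d.insert yr "100") PySem.Dict.empty
  let d := (PySem.List.pyRange 1992 2001 1).foldl (fun d yr => d.insert yr "200") d
  let d := (PySem.List.pyRange 2001 2011 1).foldl (fun d yr => d.insert yr "300") d
  let d := (PySem.List.pyRange 2011 2017 1).foldl (fun d yr => d.insert yr "400") d
  (d.get? year).getD ""

-- ===== PORT B =====
-- direct dispatch on year ranges; the out-of-range raise is excluded by Pre_prodnum.
def prodnum_alt (year : Int) : String :=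
  if ¬ (1980 ≤ year ∧ year < 2017) then ""   -- raise KeyError(year): outside Pre_
  else if year < 1992 then "100"
  else if year < 2001 then "200"
  else if year < 2011 then "300"
  else "400"

-- ===== PRECONDITION & SPEC =====
-- A raises KeyError for years outside 1980..2016 (so does B); exactly those are excluded.
def Pre_prodnum (year : Int) : Prop := 1980 ≤ year ∧ year < 2017
instance (year : Int) : Decidable (Pre_prodnum year) := by unfold Pre_prodnum; infer_instance
def pvWitness_prodnum : Int := (1995)
def Spec_prodnum (year : Int) (out : String) : Prop := out = prodnum_alt year
instance (year : Int) (out : String) : Decidable (Spec_prodnum year out) := by unfold Spec_prodnum; infer_instance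

-- ===== CLAIM (what is proved, stated in full; the proofs are below) =====
def Claim_equal_prodnum : Prop := ∀ (year : Int), Dom_prodnum year → Pre_prodnum year → Spec_prodnum year (prodnum year)

-- ===== LEMMAS AND PROOFS =====

-- ===== VERDICT (by name: the statement is the Claim_ definition above) =====
theorem prodnum_spec : Claim_equal_prodnum := by
  intro year _ hpre
  obtain ⟨h1, h2⟩ := hpre
  unfold Spec_prodnum
  interval_cases year <;> decide
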